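-- pv_equiv track=rewrite | github.com/AtomThum/PDFMetadataEditor | forwardparsing.py | find_range_in_list
-- ===== SOURCE A (Python) =====
-- def find_range_in_list(target_list: list[str], target_str: str) -> tuple[int, int]:
--     does_pdf_metadata_contain_text: list[bool] = [
--         True if (target_str in text) else False for text in target_list
--     ]
--     start_index: int = does_pdf_metadata_contain_text.index(True)
--     end_index: int = len(
--         does_pdf_metadata_contain_text
--     ) - does_pdf_metadata_contain_text[::-1].index(True)
--     return start_index, end_index
-- ===== SOURCE B (Python) =====
-- def find_range_in_list(target_list: list[str], target_str: str) -> tuple[int, int]: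
--     start = None
--     end = 0
--     for i, text in enumerate(target_list):
--         if target_str in text:
--             if start is None:
--                 start = i
--             end = i
--     if start is None:
--         raise ValueError("no element contains the substring")
--     return start, end + 1
-- ===== Notes on version B (the rewrite author's own statement) =====
-- stated objective: simpler
-- what changed: B makes one enumerate pass keeping two running indices (first and last match) instead of building a boolean list and scanning it twice (once reversed) with .index(True).
import Mathlib
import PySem

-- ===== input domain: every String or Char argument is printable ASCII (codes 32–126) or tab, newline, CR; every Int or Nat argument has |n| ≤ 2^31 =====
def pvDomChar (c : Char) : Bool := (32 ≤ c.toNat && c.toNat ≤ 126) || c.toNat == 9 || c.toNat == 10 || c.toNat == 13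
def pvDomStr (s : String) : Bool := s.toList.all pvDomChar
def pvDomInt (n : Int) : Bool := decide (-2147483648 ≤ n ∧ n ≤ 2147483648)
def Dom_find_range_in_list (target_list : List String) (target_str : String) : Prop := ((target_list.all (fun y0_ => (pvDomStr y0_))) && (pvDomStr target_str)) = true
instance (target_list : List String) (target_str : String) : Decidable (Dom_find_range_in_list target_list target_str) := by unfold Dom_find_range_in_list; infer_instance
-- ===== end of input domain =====

-- B replaces A's boolean table plus two .index(True) scans (one over a reversed copy) by a
-- single enumerate pass keeping two running indices (objective: simpler).

-- ===== PORT A =====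
-- literal port: boolean list, .index(True) (getD is only reached outside Pre_, where Python raises ValueError),
-- len - reversed-copy .index(True)
def find_range_in_list (target_list : List String) (target_str : String) : Int × Int :=
  let does_pdf_metadata_contain_text : List Bool :=
    target_list.map (fun text => if PySem.Str.isIn target_str text then true else false)
  let start_index : Int :=
    ((PySem.List.index? does_pdf_metadata_contain_text true).getD 0 : Nat)
  let end_index : Int :=
    (does_pdf_metadata_contain_text.length : Int) -
      ((PySem.List.index?
          ((PySem.List.slice? does_pdf_metadata_contain_text none none (-1)).getD [])
          true).getD 0 : Nat)
  (start_index, end_index)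

-- ===== PORT B =====
-- single pass: (start?, end) over enumerate; none at the end = Python's ValueError (outside Pre_)
def find_range_in_list_alt (target_list : List String) (target_str : String) : Int × Int :=
  let st := (PySem.List.enumerate target_list 0).foldl
    (fun (acc : Option Int × Int) p =>
      if PySem.Str.isIn target_str p.2 then (some (acc.1.getD p.1), p.1) else acc)
    (none, 0)
  match st.1 with
  | some a => (a, st.2 + 1)
  | none => (0, 0)

-- ===== PRECONDITION & SPEC =====
-- Pre_ excludes exactly the inputs where no element contains target_str: there A raises ValueError
-- (.index(True) on a list with no True) and B raises ValueError too.
def Pre_find_range_in_list (target_list : List String) (target_str : String) : Prop :=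
  (target_list.any (fun text => PySem.Str.isIn target_str text)) = true
instance (target_list : List String) (target_str : String) : Decidable (Pre_find_range_in_list target_list target_str) := by unfold Pre_find_range_in_list; infer_instance

def pvWitness_find_range_in_list : List String × String := (["x", "aba", "b", "ab"], "ab")

def Spec_find_range_in_list (target_list : List String) (target_str : String) (out : Int × Int) : Prop := out = find_range_in_list_alt target_list target_str
instance (target_list : List String) (target_str : String) (out : Int × Int) : Decidable (Spec_find_range_in_list target_list target_str out) := by unfold Spec_find_range_in_list; infer_instance

-- ===== CLAIM (what is proved, stated in full; the proofs are below) =====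
def Claim_equal_find_range_in_list : Prop := ∀ (target_list : List String) (target_str : String), Dom_find_range_in_list target_list target_str → Pre_find_range_in_list target_list target_str → Spec_find_range_in_list target_list target_str (find_range_in_list target_list target_str)

-- ===== LEMMAS AND PROOFS =====

-- abbreviation for B's loop (proof-side only)
def pvLoop (target_str : String) (target_list : List String) : Option Int × Int :=
  (PySem.List.enumerate target_list 0).foldl
    (fun (acc : Option Int × Int) p =>
      if PySem.Str.isIn target_str p.2 then (some (acc.1.getD p.1), p.1) else acc)
    (none, 0)

lemma pvLoop_none (target_str : String) (target_list : List String)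
    (h : ∀ t ∈ target_list, PySem.Str.isIn target_str t = false) :
    pvLoop target_str target_list = (none, 0) := by
  induction target_list using List.reverseRecOn with
  | nil => rfl
  | append_singleton L x ih =>
      have hx := h x (by simp)
      rw [PySem.Str.isIn_eq] at hx
      unfold pvLoop at *
      rw [PySem.List.enumerate_append, List.foldl_append,
        ih (fun t ht => h t (by simp [ht]))]
      simp [PySem.List.enumerate, hx]

lemma pvLoop_some (target_str : String) (target_list : List String)
    (h : ∃ t ∈ target_list, PySem.Str.isIn target_str t = true) :
    ∃ a b c : Nat,
      pvLoop target_str target_list = (some (a : Int), (b : Int)) ∧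
      PySem.List.index? (target_list.map (fun t => PySem.Str.isIn target_str t)) true = some a ∧
      PySem.List.index? (target_list.map (fun t => PySem.Str.isIn target_str t)).reverse true = some c ∧
      c + b + 1 = target_list.length := by
  induction target_list using List.reverseRecOn with
  | nil => simp at h
  | append_singleton L x ih =>
      by_cases hx : PySem.Str.isIn target_str x = true
      · rw [PySem.Str.isIn_eq] at hx
        by_cases hL : ∃ t ∈ L, PySem.Str.isIn target_str t = true
        · obtain ⟨a, b, c, hloop, hidx, _, _⟩ := ih hL
          refine ⟨a, L.length, 0, ?_, ?_, ?_, by simp⟩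
          · unfold pvLoop at *
            rw [PySem.List.enumerate_append, List.foldl_append, hloop]
            simp [PySem.List.enumerate, hx]
          · rw [List.map_append]
            rw [PySem.List.index?_append_of_mem]
            · exact hidx
            · have := PySem.List.index?_isSome_iff
                (xs := L.map (fun t => PySem.Str.isIn target_str t)) (v := true)
              rw [← this, hidx]; rfl
          · simp only [List.map_append, List.map_cons, List.map_nil, List.reverse_append,
              List.reverse_cons, List.reverse_nil, List.nil_append, List.singleton_append,
              PySem.Str.isIn_eq, hx]
            exact PySem.List.index?_cons_self true _
        · push_neg at hL
          have hnone := pvLoop_none target_str L (fun t ht => by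
            have := hL t ht; revert this; cases PySem.Str.isIn target_str t <;> simp)
          have hnotin : true ∉ L.map (fun t => PySem.Str.isIn target_str t) := by
            simp only [List.mem_map]
            rintro ⟨t, ht, hft⟩
            exact hL t ht hft
          refine ⟨L.length, L.length, 0, ?_, ?_, ?_, by simp⟩
          · unfold pvLoop at *
            rw [PySem.List.enumerate_append, List.foldl_append, hnone]
            simp [PySem.List.enumerate, hx]
          · rw [List.map_append]
            have h2 := PySem.List.index?_append_singleton_self _ true hnotin
            simp only [List.map_cons, List.map_nil, PySem.Str.isIn_eq, hx, List.length_map] at h2 ⊢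
            exact h2
          · simp only [List.map_append, List.map_cons, List.map_nil, List.reverse_append,
              List.reverse_cons, List.reverse_nil, List.nil_append, List.singleton_append,
              PySem.Str.isIn_eq, hx]
            exact PySem.List.index?_cons_self true _
      · rw [PySem.Str.isIn_eq, Bool.not_eq_true] at hx
        have hL : ∃ t ∈ L, PySem.Str.isIn target_str t = true := by
          obtain ⟨t, ht, hft⟩ := h
          rcases List.mem_append.mp ht with h' | h'
          · exact ⟨t, h', hft⟩
          · simp at h'; subst h'
            rw [PySem.Str.isIn_eq, hx] at hft; exact absurd hft (by simp)
        obtain ⟨a, b, c, hloop, hidx, hrev, hlen⟩ := ih hL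
        refine ⟨a, b, c + 1, ?_, ?_, ?_, by simp; omega⟩
        · unfold pvLoop at *
          rw [PySem.List.enumerate_append, List.foldl_append, hloop]
          simp [PySem.List.enumerate, hx]
        · rw [List.map_append]
          rw [PySem.List.index?_append_of_mem]
          · exact hidx
          · have := PySem.List.index?_isSome_iff
              (xs := L.map (fun t => PySem.Str.isIn target_str t)) (v := true)
            rw [← this, hidx]; rfl
        · simp only [List.map_append, List.map_cons, List.map_nil, List.reverse_append,
            List.reverse_cons, List.reverse_nil, List.nil_append, List.singleton_append,
            PySem.Str.isIn_eq, hx]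
          simp only [PySem.Str.isIn_eq] at hrev
          rw [PySem.List.index?_cons_of_ne _ (by simp), hrev]
          rfl

-- ===== VERDICT (by name: the statement is the Claim_ definition above) =====
theorem find_range_in_list_spec : Claim_equal_find_range_in_list := by
  intro L s _ hpre
  unfold Pre_find_range_in_list at hpre
  have hex : ∃ t ∈ L, PySem.Str.isIn s t = true := by simpa [List.any_eq_true] using hpre
  obtain ⟨a, b, c, hloop, hidx, hrev, hlen⟩ := pvLoop_some s L hex
  unfold Spec_find_range_in_list find_range_in_list find_range_in_list_alt
  rw [show ((PySem.List.enumerate L 0).foldl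
      (fun (acc : Option Int × Int) p =>
        if PySem.Str.isIn s p.2 then (some (acc.1.getD p.1), p.1) else acc)
      (none, 0)) = pvLoop s L from rfl, hloop]
  have hmap : (L.map (fun text => if PySem.Str.isIn s text then true else false))
      = L.map (fun t => PySem.Str.isIn s t) := by
    simp
  simp only [PySem.List.slice?_none_none_neg_one, Option.getD_some, hmap, hidx, hrev,
    List.length_map]
  have : ((L.length : Int) - (c : Nat)) = (b : Int) + 1 := by omega
  simp [this]
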